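-- pv_equiv track=rewrite | github.com/bernie-skipole/exercise | exercise/code/exercise.py | _next_major_section
-- ===== SOURCE A (Python) =====
-- def _next_major_section(sectionlist):
--     "Returns a list of next major section numbers"
--
--     length = len(sectionlist)
--
--     if length == 1:
--         return [None]
--
--     if length == 2:
--         if sectionlist[0][1] == sectionlist[1][1]:
--             # only one title, repeated, so no next
--             return [None, None]
--         else:
--             return [ 1, None ]
--
--     # now for the case of more than two sections
--
--     nextsections = [None] * length
--
--     for counter in range(length-1):
--         current_title = sectionlist[counter][1]
--         next_number = None
--         for rst in range(counter+1, length):   # iterate through remaining numbers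
--             if sectionlist[rst][1] != current_title:
--                 next_number = rst
--                 break
--         nextsections[counter] = next_number
--
--     return nextsections
-- ===== SOURCE B (Python) =====
-- def _next_major_section(sectionlist):
--     "Returns a list of next major section numbers"
--     n = len(sectionlist)
--     if n == 0:
--         return []
--     out = [None]
--     nxt = None
--     for i in reversed(range(n - 1)):
--         if sectionlist[i][1] != sectionlist[i + 1][1]:
--             nxt = i + 1
--         out.append(nxt)
--     out.reverse()
--     return out
-- ===== Notes on version B (the rewrite author's own statement) =====
-- stated objective: alternative
-- what changed: Replaces the per-position forward rescan (nested loops, worst-case quadratic on long equal-title runs) by a single backward pass that carries the next differing-title index; a timing run measured only ~1.3x, so no speed is claimed.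
import Mathlib
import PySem

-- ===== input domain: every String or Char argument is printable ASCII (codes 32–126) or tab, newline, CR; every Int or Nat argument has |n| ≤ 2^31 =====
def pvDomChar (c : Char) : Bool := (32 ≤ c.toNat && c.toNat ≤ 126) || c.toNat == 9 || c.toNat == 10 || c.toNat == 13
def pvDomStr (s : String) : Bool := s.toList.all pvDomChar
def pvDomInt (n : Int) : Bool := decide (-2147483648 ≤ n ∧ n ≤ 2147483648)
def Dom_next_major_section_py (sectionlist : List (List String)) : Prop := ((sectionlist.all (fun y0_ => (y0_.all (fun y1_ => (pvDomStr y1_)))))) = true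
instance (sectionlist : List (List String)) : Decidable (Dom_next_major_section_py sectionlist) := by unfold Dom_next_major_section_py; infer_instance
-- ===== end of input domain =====

-- B replaces A's per-position forward rescan by one backward pass carrying the next differing-title index (objective: alternative; intended as faster on run-heavy input, a timing run measured only ~1.3x, so no speed is claimed).

-- ===== PORT A =====
-- sectionlist[i][1]; exact under Pre_ (every index the Python evaluates is then in range)
def pyTitle (s : List (List String)) (i : Nat) : String :=
  ((s.getD i []).getD 1 "")

-- the inner `for rst in range(counter+1, length): … break` loop: first rst with a differing title
def innerA (s : List (List String)) (counter : Nat) : Option Int :=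
  ((List.range' (counter + 1) (s.length - (counter + 1))).find?
    (fun rst => pyTitle s rst != pyTitle s counter)).map (fun rst => (rst : Int))

def next_major_section_py (sectionlist : List (List String)) : List (Option Int) :=
  let length := sectionlist.length
  if length = 1 then [none]
  else if length = 2 then
    (if pyTitle sectionlist 0 == pyTitle sectionlist 1 then [none, none] else [some 1, none])
  else
    -- nextsections = [None]*length; for counter in range(length-1): nextsections[counter] = …
    (List.range (length - 1)).foldl
      (fun ns counter => ns.set counter (innerA sectionlist counter))
      (List.replicate length none)

-- ===== PORT B =====
-- one iteration of B's backward loop: update the carried next-differing index, append it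
def bStep (s : List (List String)) (st : List (Option Int) × Option Int) (i : Nat) :
    List (Option Int) × Option Int :=
  let nxt := if pyTitle s i != pyTitle s (i + 1) then some ((i + 1 : Nat) : Int) else st.2
  (st.1 ++ [nxt], nxt)

def next_major_section_py_alt (sectionlist : List (List String)) : List (Option Int) :=
  let n := sectionlist.length
  if n = 0 then []
  else (((List.range (n - 1)).reverse.foldl (bStep sectionlist) ([none], none)).1).reverse

-- ===== PRECONDITION & SPEC =====
-- Pre_ excludes exactly the inputs where Python A raises IndexError: some inner list has
-- fewer than 2 entries while the outer list has ≥ 2 sections (with ≤ 1 section A never indexes).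
def Pre_next_major_section_py (sectionlist : List (List String)) : Prop :=
  sectionlist.length ≤ 1 ∨ ∀ l ∈ sectionlist, 2 ≤ l.length
instance (sectionlist : List (List String)) : Decidable (Pre_next_major_section_py sectionlist) := by unfold Pre_next_major_section_py; infer_instance

def pvWitness_next_major_section_py : List (List String) := [["1", "a"], ["2", "a"], ["3", "b"]]

def Spec_next_major_section_py (sectionlist : List (List String)) (out : List (Option Int)) : Prop := out = next_major_section_py_alt sectionlist
instance (sectionlist : List (List String)) (out : List (Option Int)) : Decidable (Spec_next_major_section_py sectionlist out) := by unfold Spec_next_major_section_py; infer_instance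

-- ===== CLAIM (what is proved, stated in full; the proofs are below) =====
def Claim_equal_next_major_section_py : Prop := ∀ (sectionlist : List (List String)), Dom_next_major_section_py sectionlist → Pre_next_major_section_py sectionlist → Spec_next_major_section_py sectionlist (next_major_section_py sectionlist)

-- ===== LEMMAS AND PROOFS =====

-- the carried value is `none` at the last index
lemma innerA_last (s : List (List String)) (h : 1 ≤ s.length) :
    innerA s (s.length - 1) = none := by
  unfold innerA
  have : s.length - (s.length - 1 + 1) = 0 := by omega
  simp [this]

-- the key recurrence: the first differing index after i is i+1 if titles differ, else the one after i+1
lemma innerA_rec (s : List (List String)) (i : Nat) (h : i + 1 < s.length) :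
    innerA s i =
      if pyTitle s i != pyTitle s (i + 1) then some ((i + 1 : Nat) : Int) else innerA s (i + 1) := by
  unfold innerA
  have hlen : s.length - (i + 1) = (s.length - (i + 2)) + 1 := by omega
  rw [hlen, List.range'_succ, List.find?_cons]
  by_cases hc : pyTitle s i = pyTitle s (i + 1)
  · have h1 : (pyTitle s (i + 1) != pyTitle s i) = false := by simp [hc]
    have h2 : (pyTitle s i != pyTitle s (i + 1)) = false := by simp [hc]
    rw [h1, h2]
    simp only [if_false, Bool.false_eq_true]
    have : (fun rst => pyTitle s rst != pyTitle s i) = (fun rst => pyTitle s rst != pyTitle s (i + 1)) := by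
      funext rst; rw [hc]
    rw [this]
  · have h1 : (pyTitle s (i + 1) != pyTitle s i) = true := by simp [bne]; exact fun e => hc e.symm
    have h2 : (pyTitle s i != pyTitle s (i + 1)) = true := by simp [bne]; exact hc
    rw [h1, h2]
    simp

-- B's backward fold, characterised: starting with the correct carried value at m, it appends innerA values
lemma bFold (s : List (List String)) :
    ∀ m, m < s.length → ∀ out : List (Option Int),
      (List.range m).reverse.foldl (bStep s) (out, innerA s m) =
        (out ++ (List.range m).reverse.map (innerA s), innerA s 0) := by
  intro m
  induction m with
  | zero => intro _ out; simp
  | succ m ih =>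
    intro h out
    rw [List.range_succ, List.reverse_append]
    simp only [List.reverse_singleton, List.singleton_append, List.foldl_cons, List.map_cons]
    have hstep : bStep s (out, innerA s (m + 1)) m = (out ++ [innerA s m], innerA s m) := by
      simp only [bStep]
      rw [← innerA_rec s m h]
    rw [hstep, ih (by omega) (out ++ [innerA s m])]
    simp

-- B's result in closed form
lemma alt_char (s : List (List String)) (h : 1 ≤ s.length) :
    next_major_section_py_alt s = (List.range (s.length - 1)).map (innerA s) ++ [none] := by
  unfold next_major_section_py_alt
  have h0 : ¬ s.length = 0 := by omega
  simp only [h0, if_false]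
  have hnone : (none : Option Int) = innerA s (s.length - 1) := (innerA_last s h).symm
  rw [hnone, bFold s (s.length - 1) (by omega) [innerA s (s.length - 1)]]
  simp [innerA_last s h, List.map_reverse]

-- A's set-fold preserves length
lemma setFold_len (s : List (List String)) :
    ∀ m (ns : List (Option Int)),
      ((List.range m).foldl (fun ns c => ns.set c (innerA s c)) ns).length = ns.length := by
  intro m
  induction m with
  | zero => intro ns; simp
  | succ m ih =>
    intro ns
    rw [List.range_succ, List.foldl_append]
    simp [ih]

-- elementwise value of A's set-fold
lemma setFold_get (s : List (List String)) :
    ∀ m (ns : List (Option Int)) (i : Nat),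
      ((List.range m).foldl (fun ns c => ns.set c (innerA s c)) ns)[i]? =
        if i < m ∧ i < ns.length then some (innerA s i) else ns[i]? := by
  intro m
  induction m with
  | zero => intro ns i; simp
  | succ m ih =>
    intro ns i
    rw [List.range_succ, List.foldl_append]
    simp only [List.foldl_cons, List.foldl_nil]
    rw [List.getElem?_set]
    rw [setFold_len]
    by_cases hm : m = i
    · subst hm
      by_cases hl : m < ns.length <;> simp [hl]
    · simp only [hm, if_false]
      rw [ih]
      by_cases h1 : i < m ∧ i < ns.length
      · simp [h1, Nat.lt_succ_of_lt h1.1]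
      · have : ¬ (i < m + 1 ∧ i < ns.length) := by
          rintro ⟨a, b⟩; exact h1 ⟨by omega, b⟩
        simp only [h1, if_false]
        rw [if_neg this]

-- A's fold branch equals B's closed form
lemma fold_char (s : List (List String)) (h : 1 ≤ s.length) :
    (List.range (s.length - 1)).foldl
        (fun ns counter => ns.set counter (innerA s counter))
        (List.replicate s.length none) =
      (List.range (s.length - 1)).map (innerA s) ++ [none] := by
  apply List.ext_getElem?
  intro i
  rw [setFold_get]
  simp only [List.length_replicate, List.getElem?_replicate]
  by_cases h1 : i < s.length - 1
  · have : i < (List.range (s.length - 1)).length := by simpa using h1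
    rw [List.getElem?_append_left (by simpa using h1)]
    simp [h1, (by omega : i < s.length)]
  · rw [List.getElem?_append_right (by simpa using (by omega : s.length - 1 ≤ i))]
    by_cases h2 : i < s.length
    · have hi : i = s.length - 1 := by omega
      have hne : s ≠ [] := by intro e; rw [e] at h2; simp at h2
      simp [hi, hne]
    · have : ¬ i - (s.length - 1) = 0 := by omega
      simp [h1, h2, this]

-- ===== VERDICT (by name: the statement is the Claim_ definition above) =====
theorem next_major_section_py_spec : Claim_equal_next_major_section_py := by
  intro s _ _
  unfold Spec_next_major_section_py next_major_section_py
  by_cases h1 : s.length = 1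
  · rw [alt_char s (by omega)]
    simp [h1]
  · by_cases h2 : s.length = 2
    · rw [alt_char s (by omega)]
      simp only [h2]
      norm_num
      have hinner : innerA s 0 = if pyTitle s 1 != pyTitle s 0 then some 1 else none := by
        unfold innerA
        rw [h2]
        rw [show (2 : Nat) - (0 + 1) = 0 + 1 from rfl, List.range'_succ, List.find?_cons]
        by_cases hc : (pyTitle s 1 != pyTitle s 0) = true <;> simp [hc]
      by_cases hc : pyTitle s 0 = pyTitle s 1
      · have hb' : (pyTitle s 1 != pyTitle s 0) = false := by simp [hc]
        simp [hc, hinner]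
      · have hb : (pyTitle s 0 == pyTitle s 1) = false := by simp [hc]
        have hb' : (pyTitle s 1 != pyTitle s 0) = true := by simp [bne]; exact fun e => hc e.symm
        simp [hinner, hb']
        exact hc
    · by_cases h0 : s.length = 0
      · have hs : s = [] := List.eq_nil_of_length_eq_zero h0
        subst hs
        simp [next_major_section_py_alt]
      · rw [alt_char s (by omega)]
        simp only [h1, if_false, h2]
        rw [fold_char s (by omega)]
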